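-- pv_equiv track=rewrite | github.com/amandhawb/algorithms | arrays/find_encrypted_number_pascal_triangle.py | encrypted_pascal_triangle
-- ===== SOURCE A (Python) =====
-- def encrypted_pascal_triangle(nums):
--     while len(nums) > 2:
--         new_nums = []
--         for i in range(len(nums) -1):
--             summed_value = (nums[i] + nums[i+1]) % 10
--             new_nums.append(summed_value)
--         nums = new_nums
--     return "".join(map(str, nums))
-- ===== SOURCE B (Python) =====
-- def encrypted_pascal_triangle(nums):
--     # Closed form: after collapsing, the two remaining digits are binomially
--     # weighted sums C(n-2,i) of the input, taken mod 10 (one pass, no O(n^2) loop).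
--     n = len(nums)
--     if n <= 2:
--         return "".join(map(str, nums))
--     m = n - 2
--     s0 = 0
--     s1 = 0
--     c = 1
--     for i in range(m + 1):
--         s0 += c * nums[i]
--         s1 += c * nums[i + 1]
--         c = c * (m - i) // (i + 1)
--     return "".join(map(str, [s0 % 10, s1 % 10]))
-- ===== Notes on version B (the rewrite author's own statement) =====
-- stated objective: faster
-- what changed: Replaces the repeated O(n^2) pairwise-collapse loop with a single pass computing the two closed-form binomially weighted sums sum C(n-2,i)*nums[i] and sum C(n-2,i)*nums[i+1] mod 10, with the binomial row generated by the multiplicative recurrence.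
import Mathlib
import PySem

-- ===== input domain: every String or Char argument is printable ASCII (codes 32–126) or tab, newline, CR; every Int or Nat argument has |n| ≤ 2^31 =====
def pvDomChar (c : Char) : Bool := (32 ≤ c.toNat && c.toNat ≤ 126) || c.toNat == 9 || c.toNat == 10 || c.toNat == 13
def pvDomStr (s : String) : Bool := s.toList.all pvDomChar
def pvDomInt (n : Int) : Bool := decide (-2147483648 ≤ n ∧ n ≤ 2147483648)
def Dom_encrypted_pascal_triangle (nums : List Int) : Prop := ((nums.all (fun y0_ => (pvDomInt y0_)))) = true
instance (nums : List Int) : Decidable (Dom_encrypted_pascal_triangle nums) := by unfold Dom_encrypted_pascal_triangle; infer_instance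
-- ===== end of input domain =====

-- B replaces A's O(n^2) repeated pairwise-collapse with one pass over the closed-form
-- binomially weighted sums mod 10 (the binomial row built by the multiplicative recurrence).

-- ===== PORT A =====
-- one iteration of A's while-body: new_nums built by appending (nums[i]+nums[i+1]) % 10
def pvStepA (nums : List Int) : List Int :=
  (PySem.List.pyRange 0 ((nums.length : Int) - 1) 1).foldl
    (fun new_nums i =>
      new_nums ++
        [PySem.Int.mod (PySem.List.pyGetD nums i 0 + PySem.List.pyGetD nums (i + 1) 0) 10])
    []

lemma pvStepA_eq_map (nums : List Int) :
    pvStepA nums = (List.range (nums.length - 1)).map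
      (fun k => (nums.getD k 0 + nums.getD (k + 1) 0) % 10) := by
  unfold pvStepA
  rw [PySem.List.pyRange_one, List.foldl_map, PySem.List.foldl_append_singleton_eq_map]
  have h : (((nums.length : Int) - 1) - 0).toNat = nums.length - 1 := by omega
  rw [h]
  apply List.map_congr_left
  intro k _
  have h1 : (0 : Int) + (k : Int) = ((k : Nat) : Int) := zero_add _
  have h2 : (k : Int) + 1 = (((k + 1 : Nat)) : Int) := by push_cast; ring
  rw [h1, h2, PySem.List.pyGetD_natCast, PySem.List.pyGetD_natCast,
    PySem.Int.mod_eq_emod_of_pos (by norm_num)]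

lemma pvStepA_length (nums : List Int) : (pvStepA nums).length = nums.length - 1 := by
  rw [pvStepA_eq_map]; simp

-- A's while-loop: repeat the collapse while len(nums) > 2
def pvLoopA (nums : List Int) : List Int :=
  if 2 < nums.length then pvLoopA (pvStepA nums) else nums
termination_by nums.length
decreasing_by rw [pvStepA_length]; omega

def encrypted_pascal_triangle (nums : List Int) : String :=
  PySem.Str.join "" ((pvLoopA nums).map PySem.Int.toStr)

-- ===== PORT B =====
-- the body of B's single for-loop, state (s0, s1, c)
def pvFoldB (nums : List Int) (m : Int) : Int × Int × Int → Int → Int × Int × Int :=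
  fun st i =>
    (st.1 + st.2.2 * PySem.List.pyGetD nums i 0,
     st.2.1 + st.2.2 * PySem.List.pyGetD nums (i + 1) 0,
     PySem.Int.floordiv (st.2.2 * (m - i)) (i + 1))

def encrypted_pascal_triangle_alt (nums : List Int) : String :=
  let n := nums.length
  if n ≤ 2 then PySem.Str.join "" (nums.map PySem.Int.toStr)
  else
    let m : Int := (n : Int) - 2
    let st := (PySem.List.pyRange 0 (m + 1) 1).foldl (pvFoldB nums m) (0, 0, 1)
    PySem.Str.join ""
      (([PySem.Int.mod st.1 10, PySem.Int.mod st.2.1 10]).map PySem.Int.toStr)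

-- ===== PRECONDITION & SPEC =====
def Spec_encrypted_pascal_triangle (nums : List Int) (out : String) : Prop := out = encrypted_pascal_triangle_alt nums
instance (nums : List Int) (out : String) : Decidable (Spec_encrypted_pascal_triangle nums out) := by unfold Spec_encrypted_pascal_triangle; infer_instance

-- ===== CLAIM (what is proved, stated in full; the proofs are below) =====
def Claim_equal_encrypted_pascal_triangle : Prop := ∀ (nums : List Int), Dom_encrypted_pascal_triangle nums → Spec_encrypted_pascal_triangle nums (encrypted_pascal_triangle nums)

-- ===== LEMMAS AND PROOFS =====

-- the binomially weighted sum  Σ_{i≤m} C(m,i) * l[i]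
def pvW (m : Nat) (l : List Int) : Int :=
  ∑ i ∈ Finset.range (m + 1), (Nat.choose m i : Int) * l.getD i 0

lemma pvGetD_tail (l : List Int) (k : Nat) : l.tail.getD k 0 = l.getD (k + 1) 0 := by
  cases l <;> simp

lemma pascal_sum (n : Nat) (f : Nat → Int) :
    ∑ i ∈ Finset.range (n + 2), (Nat.choose (n + 1) i : Int) * f i
      = ∑ i ∈ Finset.range (n + 1), (Nat.choose n i : Int) * (f i + f (i + 1)) := by
  rw [Finset.sum_range_succ' (fun i => (Nat.choose (n + 1) i : Int) * f i)]
  have hsplit : ∀ i, (Nat.choose (n + 1) (i + 1) : Int) * f (i + 1)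
      = (Nat.choose n i : Int) * f (i + 1) + (Nat.choose n (i + 1) : Int) * f (i + 1) := by
    intro i
    have := Nat.choose_succ_succ n i
    push_cast [this]
    ring
  rw [Finset.sum_congr rfl (fun i _ => hsplit i), Finset.sum_add_distrib]
  have h2 : ∑ i ∈ Finset.range (n + 1), (Nat.choose n (i + 1) : Int) * f (i + 1)
      + (Nat.choose (n + 1) 0 : Int) * f 0
      = ∑ i ∈ Finset.range (n + 1), (Nat.choose n i : Int) * f i := by
    have h3 := Finset.sum_range_succ' (fun i => (Nat.choose n i : Int) * f i) (n + 1)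
    have h4 := Finset.sum_range_succ (fun i => (Nat.choose n i : Int) * f i) (n + 1)
    simp only [Nat.choose_zero_right, Nat.choose_succ_self, Nat.cast_zero,
      Nat.cast_one] at h3 h4 ⊢
    rw [h4] at h3
    simp at h3 ⊢
    linarith
  rw [add_assoc, h2, ← Finset.sum_add_distrib]
  apply Finset.sum_congr rfl
  intro i _
  ring

lemma pvGetD_step (l : List Int) (k : Nat) (hk : k + 1 < l.length) :
    (pvStepA l).getD k 0 = (l.getD k 0 + l.getD (k + 1) 0) % 10 := by
  rw [pvStepA_eq_map]
  rw [List.getD_eq_getElem?_getD, List.getElem?_map, List.getElem?_range (by omega)]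
  simp

lemma pvStepA_tail (l : List Int) : (pvStepA l).tail = pvStepA l.tail := by
  rcases l with _ | ⟨a, t⟩
  · rfl
  rcases t with _ | ⟨b, u⟩
  · rfl
  rw [List.tail_cons, pvStepA_eq_map, pvStepA_eq_map]
  simp only [List.length_cons, Nat.add_sub_cancel]
  rw [List.range_succ_eq_map, List.map_cons, List.tail_cons, List.map_map]
  apply List.map_congr_left
  intro k _
  simp [List.getD]

lemma pvW_mod_step (n : Nat) (l : List Int) (h : n + 3 ≤ l.length) :
    pvW (n + 1) (pvStepA l) % 10 = pvW (n + 2) l % 10 := by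
  unfold pvW
  have hcong : ∀ i ∈ Finset.range (n + 2),
      (Nat.choose (n + 1) i : Int) * (pvStepA l).getD i 0
        = (Nat.choose (n + 1) i : Int) * ((l.getD i 0 + l.getD (i + 1) 0) % 10) := by
    intro i hi
    rw [pvGetD_step l i (by simp only [Finset.mem_range] at hi; omega)]
  rw [Finset.sum_congr rfl hcong, Finset.sum_int_mod]
  have hcong2 : ∀ i ∈ Finset.range (n + 2),
      ((Nat.choose (n + 1) i : Int) * ((l.getD i 0 + l.getD (i + 1) 0) % 10)) % 10
        = ((Nat.choose (n + 1) i : Int) * (l.getD i 0 + l.getD (i + 1) 0)) % 10 := by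
    intro i _
    conv_lhs => rw [Int.mul_emod, Int.emod_emod_of_dvd _ dvd_rfl, ← Int.mul_emod]
  rw [Finset.sum_congr rfl hcong2, ← Finset.sum_int_mod, ← pascal_sum (n + 1) (fun i => l.getD i 0)]

lemma pvLoopA_eq (n : Nat) : ∀ (l : List Int), l.length = n + 3 →
    pvLoopA l = [pvW (n + 1) l % 10, pvW (n + 1) l.tail % 10] := by
  induction n with
  | zero =>
    intro l hl
    rw [pvLoopA, if_pos (by omega)]
    rw [pvLoopA, if_neg (by rw [pvStepA_length]; omega)]
    rcases l with _ | ⟨a, _ | ⟨b, _ | ⟨c, _ | ⟨d, t⟩⟩⟩⟩ <;> simp_all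
    rw [pvStepA_eq_map]
    simp [pvW, Finset.sum_range_succ, List.range_succ, List.getD]
  | succ n ih =>
    intro l hl
    rw [pvLoopA, if_pos (by omega)]
    rw [ih (pvStepA l) (by rw [pvStepA_length]; omega)]
    rw [pvW_mod_step n l (by omega), pvStepA_tail,
      pvW_mod_step n l.tail (by simp only [List.length_tail]; omega)]

lemma pvFoldB_inv (nums : List Int) (m : Nat) :
    ∀ (k j : Nat), m + 1 - j = k → j ≤ m + 1 → ∀ (s0 s1 : Int),
      (PySem.List.pyRange (j : Int) ((m : Int) + 1) 1).foldl (pvFoldB nums ((m : Int))) (s0, s1, (Nat.choose m j : Int))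
        = (s0 + ∑ i ∈ Finset.Ico j (m + 1), (Nat.choose m i : Int) * nums.getD i 0,
           s1 + ∑ i ∈ Finset.Ico j (m + 1), (Nat.choose m i : Int) * nums.getD (i + 1) 0,
           (Nat.choose m (m + 1) : Int)) := by
  intro k
  induction k with
  | zero =>
    intro j hk hj s0 s1
    have hj' : j = m + 1 := by omega
    subst hj'
    rw [PySem.List.pyRange_one_eq_nil (by push_cast; omega)]
    simp
  | succ k ih =>
    intro j hk hj s0 s1
    have hjm : j ≤ m := by omega
    rw [PySem.List.pyRange_one_cons (by omega), List.foldl_cons]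
    have e0 : PySem.List.pyGetD nums ((j : Nat) : Int) 0 = nums.getD j 0 :=
      PySem.List.pyGetD_natCast nums j 0
    have e1 : PySem.List.pyGetD nums (((j : Nat) : Int) + 1) 0 = nums.getD (j + 1) 0 := by
      rw [show ((j : Nat) : Int) + 1 = (((j + 1 : Nat)) : Int) by push_cast; ring]
      exact PySem.List.pyGetD_natCast nums (j + 1) 0
    have hc : PySem.Int.floordiv ((Nat.choose m j : Int) * ((m : Int) - (j : Int))) ((j : Int) + 1)
        = (Nat.choose m (j + 1) : Int) := by
      rw [show ((m : Int) - (j : Int)) = ((m - j : Nat) : Int) by omega,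
        show ((j : Int) + 1) = (((j + 1 : Nat)) : Int) by push_cast; ring,
        ← Nat.cast_mul, PySem.Int.floordiv_natCast]
      norm_cast
      rw [← Nat.choose_succ_right_eq]
      exact Nat.mul_div_cancel _ (by omega)
    have hstep : pvFoldB nums ((m : Int)) (s0, s1, (Nat.choose m j : Int)) ((j : Nat) : Int)
        = (s0 + (Nat.choose m j : Int) * nums.getD j 0,
           s1 + (Nat.choose m j : Int) * nums.getD (j + 1) 0,
           (Nat.choose m (j + 1) : Int)) := by
      unfold pvFoldB
      rw [e0, e1, hc]
    rw [hstep,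
      show ((j : Nat) : Int) + 1 = (((j + 1 : Nat)) : Int) by push_cast; ring,
      ih (j + 1) (by omega) (by omega)]
    rw [Finset.sum_eq_sum_Ico_succ_bot (show j < m + 1 by omega)
        (fun i => (Nat.choose m i : Int) * nums.getD i 0),
      Finset.sum_eq_sum_Ico_succ_bot (show j < m + 1 by omega)
        (fun i => (Nat.choose m i : Int) * nums.getD (i + 1) 0)]
    simp [add_assoc]

-- bridge: the fold in port B computes the two weighted sums
lemma pvFoldB_inv' (nums : List Int) (n : Nat) (hn : nums.length = n + 3) :
    (PySem.List.pyRange 0 (((n + 1 : Nat) : Int) + 1) 1).foldl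
        (pvFoldB nums ((nums.length : Int) - 2)) (0, 0, 1)
      = (pvW (n + 1) nums, pvW (n + 1) nums.tail, (0 : Int)) := by
  have hm : ((nums.length : Int) - 2) = (((n + 1 : Nat)) : Int) := by omega
  have h := pvFoldB_inv nums (n + 1) (n + 2) 0 rfl (by omega) 0 0
  simp only [Nat.choose_zero_right, Nat.cast_one, Nat.cast_zero, Nat.choose_succ_self,
    zero_add] at h
  rw [hm, h]
  have ht : ∀ i, nums.getD (i + 1) 0 = nums.tail.getD i 0 := fun i => (pvGetD_tail nums i).symm
  unfold pvW
  simp only [Finset.range_eq_Ico, ht]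

-- ===== VERDICT (by name: the statement is the Claim_ definition above) =====
theorem encrypted_pascal_triangle_spec : Claim_equal_encrypted_pascal_triangle := by
  intro nums _
  unfold Spec_encrypted_pascal_triangle encrypted_pascal_triangle encrypted_pascal_triangle_alt
  dsimp only
  by_cases h : nums.length ≤ 2
  · rw [pvLoopA, if_neg (by omega), if_pos h]
  · obtain ⟨n, hn⟩ : ∃ n, nums.length = n + 3 := ⟨nums.length - 3, by omega⟩
    rw [if_neg h, pvLoopA_eq n nums hn,
      show (((nums.length : Int) - 2) + 1) = (((n + 1 : Nat)) : Int) + 1 by omega,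
      pvFoldB_inv' nums n hn,
      PySem.Int.mod_eq_emod_of_pos (by norm_num), PySem.Int.mod_eq_emod_of_pos (by norm_num)]
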